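-- pv_equiv track=rewrite | github.com/QI-Tony/class | hw1.py | indices_biggest
-- ===== SOURCE A (Python) =====
-- def indices_biggest(lists):
--     tem = lists[0][0]
--     ret = [0,0]
--     for i in range(len(lists)):
--         for j in range(len(lists[i])):
--             if lists[i][j] > tem:
--                 tem = lists[i][j]
--                 ret[0] = i
--                 ret[1] = j
--     return ret
-- ===== SOURCE B (Python) =====
-- def indices_biggest(lists):
--     tem = lists[0][0]
--     ret = [0, 0]
--     for i, row in enumerate(lists):
--         if not row:
--             continue
--         val = max(row)
--         if val > tem:
--             tem = val
--             ret = [i, row.index(val)]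
--     return ret
-- ===== Notes on version B (the rewrite author's own statement) =====
-- stated objective: alternative
-- what changed: Replaces the flat index-by-index double scan with a two-stage decomposition: one per-row reduction (max + first index of that max) followed by a strict-greater combine across rows, preserving row-major first-occurrence tie behaviour.
import Mathlib
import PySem

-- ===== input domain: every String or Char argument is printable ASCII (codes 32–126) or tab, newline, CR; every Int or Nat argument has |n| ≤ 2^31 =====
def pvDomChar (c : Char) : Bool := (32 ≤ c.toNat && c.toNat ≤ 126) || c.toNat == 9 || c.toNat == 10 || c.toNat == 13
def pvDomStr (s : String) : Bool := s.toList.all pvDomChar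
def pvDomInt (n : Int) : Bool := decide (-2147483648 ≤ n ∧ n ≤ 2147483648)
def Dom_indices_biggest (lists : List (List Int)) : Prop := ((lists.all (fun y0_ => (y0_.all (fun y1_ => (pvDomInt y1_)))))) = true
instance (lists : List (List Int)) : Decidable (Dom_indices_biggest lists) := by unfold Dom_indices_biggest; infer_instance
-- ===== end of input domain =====

-- B replaces A's flat element-by-element double scan with per-row reductions (max + first index
-- of the max) combined across rows by strict '>'; same cost, different decomposition (objective: alternative).

-- ===== PORT A =====
def indices_biggest (lists : List (List Int)) : List Int :=
  -- state (tem, ret0, ret1), seeded at (lists[0][0], 0, 0); Python raises IndexError on an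
  -- empty outer list / empty first row — excluded by Pre_
  match
    (PySem.List.pyRange 0 (PySem.List.len lists) 1).foldl
      (fun (s : Int × Int × Int) i =>
        (PySem.List.pyRange 0 (PySem.List.len (PySem.List.pyGetD lists i [])) 1).foldl
          (fun (t : Int × Int × Int) j =>
            if PySem.List.pyGetD (PySem.List.pyGetD lists i []) j 0 > t.1 then
              (PySem.List.pyGetD (PySem.List.pyGetD lists i []) j 0, i, j)
            else t) s)
      (PySem.List.pyGetD (PySem.List.pyGetD lists 0 []) 0 0, 0, 0)
  with
  | (_, a, b) => [a, b]

-- ===== PORT B =====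
def indices_biggest_alt (lists : List (List Int)) : List Int :=
  -- state (tem, ret), seeded at (lists[0][0], [0, 0]) (same IndexError corner as A, excluded by Pre_);
  -- for i, row in enumerate(lists): skip empty rows, val = max(row), strict-greater combine
  match
    (PySem.List.enumerate lists).foldl
      (fun (s : Int × List Int) (p : Int × List Int) =>
        if p.2 = [] then s
        else
          if (PySem.List.max? p.2 (fun y => y)).getD 0 > s.1 then
            ((PySem.List.max? p.2 (fun y => y)).getD 0,
             [p.1, (((PySem.List.index? p.2 ((PySem.List.max? p.2 (fun y => y)).getD 0)).getD 0 : Nat) : Int)])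
          else s)
      (PySem.List.pyGetD (PySem.List.pyGetD lists 0 []) 0 0, [0, 0])
  with
  | (_, r) => r

-- ===== PRECONDITION & SPEC =====
-- Pre_ excludes exactly the inputs where Python A raises IndexError at 'tem = lists[0][0]':
-- an empty outer list or an empty first row.
def Pre_indices_biggest (lists : List (List Int)) : Prop :=
  lists ≠ [] ∧ lists.headD [] ≠ []
instance (lists : List (List Int)) : Decidable (Pre_indices_biggest lists) := by
  unfold Pre_indices_biggest; infer_instance

def pvWitness_indices_biggest : List (List Int) := [[1, 2], [3]]

def Spec_indices_biggest (lists : List (List Int)) (out : List Int) : Prop := out = indices_biggest_alt lists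
instance (lists : List (List Int)) (out : List Int) : Decidable (Spec_indices_biggest lists out) := by unfold Spec_indices_biggest; infer_instance

-- ===== CLAIM (what is proved, stated in full; the proofs are below) =====
def Claim_equal_indices_biggest : Prop := ∀ (lists : List (List Int)), Dom_indices_biggest lists → Pre_indices_biggest lists → Spec_indices_biggest lists (indices_biggest lists)

-- ===== LEMMAS AND PROOFS =====

-- A's inner loop over one row, as structural recursion on the row with running index s.
def gInner (i : Int) : List Int → Int → Int × Int × Int → Int × Int × Int
  | [], _, t => t
  | x :: xs, s, t =>
      if x > t.1 then gInner i xs (s + 1) (x, i, s) else gInner i xs (s + 1) t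

lemma foldl_enum_inner (i : Int) (row : List Int) (s : Int) (t : Int × Int × Int) :
    (PySem.List.enumerate row s).foldl
      (fun (t : Int × Int × Int) (p : Int × Int) => if p.2 > t.1 then (p.2, i, p.1) else t) t
    = gInner i row s t := by
  induction row generalizing s t with
  | nil => simp [PySem.List.enumerate_nil, gInner]
  | cons x xs ih =>
      rw [PySem.List.enumerate_cons]
      simp only [List.foldl_cons, gInner]
      by_cases hx : x > t.1 <;> simp [hx, ih]

-- Characterisation of the inner loop: it fires iff the row's max beats tem, and then records
-- the row's max and the first index where it occurs.
lemma gInner_eq (i : Int) (row : List Int) (s : Int) (t : Int × Int × Int) :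
    gInner i row s t =
      match PySem.List.max? row (fun y => y) with
      | none => t
      | some v =>
          if v > t.1 then (v, i, s + (((PySem.List.index? row v).getD 0 : Nat) : Int)) else t := by
  induction row generalizing s t with
  | nil => simp [gInner, PySem.List.max?]
  | cons x xs ih =>
      rw [PySem.List.max?_id_cons]
      cases hmx : PySem.List.max? xs (fun y => y) with
      | none =>
          have hxs : xs = [] := (PySem.List.max?_eq_none_iff xs (fun y => y)).mp hmx
          subst hxs
          simp only [gInner, List.foldl_nil]
          by_cases hx : x > t.1 <;> simp [hx]
      | some v' =>
          have hmem : v' ∈ xs := PySem.List.max?_mem hmx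
          have h1 := PySem.List.le_foldl_max xs x
          have h2 := PySem.List.foldl_max_mem xs x
          have hM : xs.foldl max x = max x v' := by
            apply le_antisymm
            · rcases h2 with h | h
              · rw [h]; exact le_max_left _ _
              · exact le_trans (by simpa using PySem.List.max?_isMax hmx _ h) (le_max_right _ _)
            · exact max_le h1.1 (h1.2 v' hmem)
          rw [hM]
          simp only [gInner]
          by_cases hx : x > t.1
          · simp only [hx, if_true]
            rw [ih, hmx]
            by_cases hv : v' > x
            · have hne : x ≠ v' := by omega
              have hgt : v' > t.1 := by omega
              have hMv : max x v' = v' := max_eq_right (le_of_lt hv)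
              obtain ⟨k, hk⟩ : ∃ k, PySem.List.index? xs v' = some k :=
                Option.isSome_iff_exists.mp ((PySem.List.index?_isSome_iff xs v').mpr hmem)
              have e2 : ((PySem.List.index? (x :: xs) v').getD 0 : Nat) = k + 1 := by
                rw [PySem.List.index?_cons_of_ne xs hne, hk]; rfl
              have e3 : ((PySem.List.index? xs v').getD 0 : Nat) = k := by rw [hk]; rfl
              simp only [PySem.List.index?_eq_idxOf?] at e2 e3
              rw [hMv]
              simp [hv, hgt, e2, e3, Prod.ext_iff]
              omega
            · have hMv : max x v' = x := max_eq_left (by omega)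
              have e1 : ((PySem.List.index? (x :: xs) x).getD 0 : Nat) = 0 := by
                rw [PySem.List.index?_cons_self]; rfl
              simp only [PySem.List.index?_eq_idxOf?] at e1
              rw [hMv]
              simp [hv, hx, e1]
          · simp only [hx, if_false]
            rw [ih, hmx]
            by_cases hv : v' > t.1
            · have hne : x ≠ v' := by omega
              have hMv : max x v' = v' := max_eq_right (by omega)
              obtain ⟨k, hk⟩ : ∃ k, PySem.List.index? xs v' = some k :=
                Option.isSome_iff_exists.mp ((PySem.List.index?_isSome_iff xs v').mpr hmem)
              have e2 : ((PySem.List.index? (x :: xs) v').getD 0 : Nat) = k + 1 := by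
                rw [PySem.List.index?_cons_of_ne xs hne, hk]; rfl
              have e3 : ((PySem.List.index? xs v').getD 0 : Nat) = k := by rw [hk]; rfl
              simp only [PySem.List.index?_eq_idxOf?] at e2 e3
              rw [hMv]
              simp [hv, e2, e3, Prod.ext_iff]
              omega
            · have hMle : ¬ max x v' > t.1 := by
                rcases max_choice x v' with h | h <;> omega
              simp [hv, hMle]

-- One step of B's fold equals the pair-image of A's per-row loop.
lemma step_rel (p : Int × List Int) (t : Int × Int × Int) :
    (if p.2 = [] then (t.1, [t.2.1, t.2.2])
     else
       if (PySem.List.max? p.2 (fun y => y)).getD 0 > t.1 then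
         ((PySem.List.max? p.2 (fun y => y)).getD 0,
          [p.1, (((PySem.List.index? p.2 ((PySem.List.max? p.2 (fun y => y)).getD 0)).getD 0 : Nat) : Int)])
       else (t.1, [t.2.1, t.2.2]))
    = ((gInner p.1 p.2 0 t).1, [(gInner p.1 p.2 0 t).2.1, (gInner p.1 p.2 0 t).2.2]) := by
  rw [gInner_eq]
  cases hm : PySem.List.max? p.2 (fun y => y) with
  | none =>
      have : p.2 = [] := (PySem.List.max?_eq_none_iff p.2 (fun y => y)).mp hm
      simp [this]
  | some v =>
      have hne : p.2 ≠ [] := by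
        intro h
        rw [(PySem.List.max?_eq_none_iff p.2 (fun y => y)).mpr h] at hm
        simp at hm
      simp only [hne, if_false, Option.getD_some]
      by_cases hv : v > t.1 <;> simp [hv]

-- The two folds stay related along any list of (index, row) pairs.
lemma outer_rel (l : List (Int × List Int)) (t : Int × Int × Int) :
    l.foldl
      (fun (s : Int × List Int) (p : Int × List Int) =>
        if p.2 = [] then s
        else
          if (PySem.List.max? p.2 (fun y => y)).getD 0 > s.1 then
            ((PySem.List.max? p.2 (fun y => y)).getD 0,
             [p.1, (((PySem.List.index? p.2 ((PySem.List.max? p.2 (fun y => y)).getD 0)).getD 0 : Nat) : Int)])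
          else s)
      (t.1, [t.2.1, t.2.2])
    = ((l.foldl (fun s p => gInner p.1 p.2 0 s) t).1,
       [(l.foldl (fun s p => gInner p.1 p.2 0 s) t).2.1,
        (l.foldl (fun s p => gInner p.1 p.2 0 s) t).2.2]) := by
  induction l generalizing t with
  | nil => simp
  | cons p l ih =>
      simp only [List.foldl_cons]
      rw [step_rel p t]
      exact ih (gInner p.1 p.2 0 t)

-- A's fold over range(len(lists)) with indexing is the fold over enumerate(lists).
lemma outerA_eq (lists : List (List Int)) (t : Int × Int × Int) :
    (PySem.List.pyRange 0 (PySem.List.len lists) 1).foldl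
      (fun (s : Int × Int × Int) i =>
        (PySem.List.pyRange 0 (PySem.List.len (PySem.List.pyGetD lists i [])) 1).foldl
          (fun (t : Int × Int × Int) j =>
            if PySem.List.pyGetD (PySem.List.pyGetD lists i []) j 0 > t.1 then
              (PySem.List.pyGetD (PySem.List.pyGetD lists i []) j 0, i, j)
            else t) s) t
    = (PySem.List.enumerate lists).foldl (fun s p => gInner p.1 p.2 0 s) t := by
  rw [PySem.List.enumerate_eq_map_pyRange (d := ([] : List Int))]
  rw [List.foldl_map]
  apply PySem.List.foldl_congr_mem
  intro s i _
  have h := foldl_enum_inner i (PySem.List.pyGetD lists i []) 0 s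
  rw [PySem.List.enumerate_eq_map_pyRange (d := (0 : Int)), List.foldl_map] at h
  exact h

-- ===== VERDICT (by name: the statement is the Claim_ definition above) =====
theorem indices_biggest_spec : Claim_equal_indices_biggest := by
  intro lists _ _
  unfold Spec_indices_biggest indices_biggest indices_biggest_alt
  rw [outerA_eq]
  rw [show ((PySem.List.pyGetD (PySem.List.pyGetD lists 0 []) 0 0, ([0, 0] : List Int)) :
        Int × List Int)
      = (((PySem.List.pyGetD (PySem.List.pyGetD lists 0 []) 0 0, (0 : Int), (0 : Int)) :
          Int × Int × Int).1,
         [((PySem.List.pyGetD (PySem.List.pyGetD lists 0 []) 0 0, (0 : Int), (0 : Int)) :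
           Int × Int × Int).2.1,
          ((PySem.List.pyGetD (PySem.List.pyGetD lists 0 []) 0 0, (0 : Int), (0 : Int)) :
           Int × Int × Int).2.2]) from rfl]
  rw [outer_rel]
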